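-- pv_equiv track=rewrite | github.com/ange1inaxu/feature-vector-encoding | encoding.py | phi_1
-- ===== SOURCE A (Python) =====
-- def phi_1(age, feedback):
--     age_encoding = {0: range(0,20),
--                     1: range(20,40),
--                     2: range(40,60),
--                     3: range(60,80),
--                     4: range(80,100)}
--
--     feedback_encoding = {"happy": 5,
--                          "satisfied": 6,
--                          "unhappy": 7}
--
--     feature_vector = [0] * 8    # initialize a feature vector of length 8
--
--     # one-hot encoding for age interval
--     for i, age_range in age_encoding.items():
--         if age in age_range:
--             feature_vector[i] = 1
--             break
--
--     # one-hot encoding for feedback category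
--     feature_vector[feedback_encoding[feedback]] = 1
--
--     return feature_vector
-- ===== SOURCE B (Python) =====
-- def phi_1(age, feedback):
--     feature_vector = [0] * 8
--     # age bucket computed directly: the ranges in A only match integer ages 0..99
--     if isinstance(age, int) and 0 <= age < 100:
--         feature_vector[age // 20] = 1
--     feature_vector[{"happy": 5, "satisfied": 6, "unhappy": 7}[feedback]] = 1
--     return feature_vector
-- ===== Notes on version B (the rewrite author's own statement) =====
-- stated objective: simpler
-- what changed: Replaced the dict of ranges and the membership-scan loop with a direct arithmetic bucket computation (age // 20 guarded by 0 <= age < 100).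
import Mathlib
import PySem

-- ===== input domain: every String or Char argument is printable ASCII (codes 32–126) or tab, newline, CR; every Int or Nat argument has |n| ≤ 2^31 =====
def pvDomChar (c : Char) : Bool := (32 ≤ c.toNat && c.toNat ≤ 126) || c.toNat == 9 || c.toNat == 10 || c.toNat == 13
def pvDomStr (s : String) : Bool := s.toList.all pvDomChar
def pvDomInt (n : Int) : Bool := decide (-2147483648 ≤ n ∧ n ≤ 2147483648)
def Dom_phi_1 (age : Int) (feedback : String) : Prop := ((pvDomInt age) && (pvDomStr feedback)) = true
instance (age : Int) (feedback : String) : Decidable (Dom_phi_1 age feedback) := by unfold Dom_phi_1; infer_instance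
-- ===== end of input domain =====

-- B replaces A's range-dict scan loop by a direct arithmetic bucket (age // 20); simpler, same values.

-- ===== PORT A =====
-- the age_encoding dict: index ↦ (lo, hi) of its range, in insertion order
def phi1AgeEncoding : List (Nat × Int × Int) :=
  [(0, 0, 20), (1, 20, 40), (2, 40, 60), (3, 60, 80), (4, 80, 100)]

def phi1FeedbackEncoding : PySem.Dict String Int :=
  PySem.Dict.ofList [("happy", 5), ("satisfied", 6), ("unhappy", 7)]

-- the for-loop with break: first matching range sets its bit
def phi1Loop (age : Int) (items : List (Nat × Int × Int)) (fv : List Int) : List Int :=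
  match items with
  | [] => fv
  | (i, lo, hi) :: rest =>
      if lo ≤ age ∧ age < hi then fv.set i 1 else phi1Loop age rest fv

def phi_1 (age : Int) (feedback : String) : List Int :=
  let fv := List.replicate 8 (0 : Int)
  let fv := phi1Loop age phi1AgeEncoding fv
  match PySem.Dict.get? phi1FeedbackEncoding feedback with
  | some idx => fv.set idx.toNat 1
  | none => fv   -- KeyError in Python; excluded by Pre_phi_1

-- ===== PORT B =====
def phi1AltFeedbackEncoding : PySem.Dict String Int :=
  PySem.Dict.ofList [("happy", 5), ("satisfied", 6), ("unhappy", 7)]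

def phi_1_alt (age : Int) (feedback : String) : List Int :=
  let fv := List.replicate 8 (0 : Int)
  let fv := if 0 ≤ age ∧ age < 100 then fv.set (PySem.Int.floordiv age 20).toNat 1 else fv
  match PySem.Dict.get? phi1AltFeedbackEncoding feedback with
  | some idx => fv.set idx.toNat 1
  | none => fv   -- KeyError in Python; excluded by Pre_phi_1

-- ===== PRECONDITION & SPEC =====
-- Pre_ excludes exactly the inputs where A raises KeyError (unknown feedback string).
def Pre_phi_1 (age : Int) (feedback : String) : Prop :=
  feedback = "happy" ∨ feedback = "satisfied" ∨ feedback = "unhappy"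
instance (age : Int) (feedback : String) : Decidable (Pre_phi_1 age feedback) := by
  unfold Pre_phi_1; infer_instance

def pvWitness_phi_1 : Int × String := (25, "happy")

def Spec_phi_1 (age : Int) (feedback : String) (out : List Int) : Prop := out = phi_1_alt age feedback
instance (age : Int) (feedback : String) (out : List Int) : Decidable (Spec_phi_1 age feedback out) := by unfold Spec_phi_1; infer_instance

-- ===== CLAIM =====
def Claim_equal_phi_1 : Prop := ∀ (age : Int) (feedback : String), Dom_phi_1 age feedback → Pre_phi_1 age feedback → Spec_phi_1 age feedback (phi_1 age feedback)

-- ===== LEMMAS AND PROOFS =====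
lemma phi1_age_part (age : Int) :
    phi1Loop age phi1AgeEncoding (List.replicate 8 (0 : Int)) =
      (if 0 ≤ age ∧ age < 100
        then (List.replicate 8 (0 : Int)).set (PySem.Int.floordiv age 20).toNat 1
        else List.replicate 8 (0 : Int)) := by
  have h20 : (0:Int) < 20 := by norm_num
  by_cases h : 0 ≤ age ∧ age < 100
  · have hq : ∃ q : Nat, q < 5 ∧ PySem.Int.floordiv age 20 = (q : Int) ∧
        (q : Int) * 20 ≤ age ∧ age < ((q : Int) + 1) * 20 := by
      rcases h with ⟨h0, h1⟩
      by_cases c0 : age < 20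
      · exact ⟨0, by omega, (PySem.Int.floordiv_eq_iff_of_pos h20).mpr ⟨by omega, by omega⟩, by omega, by omega⟩
      · by_cases c1 : age < 40
        · exact ⟨1, by omega, (PySem.Int.floordiv_eq_iff_of_pos h20).mpr ⟨by omega, by omega⟩, by omega, by omega⟩
        · by_cases c2 : age < 60
          · exact ⟨2, by omega, (PySem.Int.floordiv_eq_iff_of_pos h20).mpr ⟨by omega, by omega⟩, by omega, by omega⟩
          · by_cases c3 : age < 80
            · exact ⟨3, by omega, (PySem.Int.floordiv_eq_iff_of_pos h20).mpr ⟨by omega, by omega⟩, by omega, by omega⟩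
            · exact ⟨4, by omega, (PySem.Int.floordiv_eq_iff_of_pos h20).mpr ⟨by omega, by omega⟩, by omega, by omega⟩
    rcases hq with ⟨q, hq5, hfd, hlo, hhi⟩
    rw [if_pos h, hfd]
    interval_cases q <;>
      · simp only [phi1Loop, phi1AgeEncoding]
        split_ifs <;> first | rfl | omega
  · rw [if_neg h]
    simp only [phi1Loop, phi1AgeEncoding]
    split_ifs <;> first | rfl | omega

theorem phi_1_spec : Claim_equal_phi_1 := by
  intro age feedback _ hpre
  unfold Spec_phi_1 phi_1 phi_1_alt
  rcases hpre with h | h | h <;> subst h <;>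
    simp only [phi1_age_part] <;> rfl
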